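-- pv_equiv track=rewrite | github.com/stanford-crfm/helm | src/helm/common/general.py | unique_simplification
-- ===== SOURCE A (Python) =====
-- from typing import Any, Callable, Dict, List, Optional, TypeVar
--
-- def without_common_entries(items: List[Dict[str, Any]]) -> List[Dict[str, Any]]:
--     """
--     Given `items` (a list of dictionaries), return a corresponding list of
--     dictionaries where all the common entries have been removed.
--     """
--     common_keys = [key for key in items[0] if all(item[key] == items[0][key] for item in items)]
--     return [dict((key, value) for key, value in item.items() if key not in common_keys) for item in items]
--
-- def unique_simplification(items: List[Dict[str, Any]], priority_keys: List[str]) -> List[Dict[str, Any]]: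
--     """
--     Given `items` (a list of dictionaries), remove any (key, value) pairs that
--     aren't necessary to distinguish the items, removing the keys not in
--     `priority_keys` and then from the end of `priority_keys` first.
--
--     Example:
--         items = [{"model": "M1", stop: "#", n: 3}, {"model": "M1", stop: "\n", n: 3}, {"model": "M2", stop: "\n", n: 3}]
--         priority_keys = ["model"]
--     Return:
--         [{"model": "M1", stop: "#"}, {"model": "M1", stop: "\n"}, {"model": "M2"}]
--     """
--
--     def get_subitem(item: Dict[str, Any], subkeys: List[str]) -> Dict[str, Any]:
--         return {key: item.get(key) for key in subkeys}
--
--     def get_keys(item: Dict[str, Any]) -> List[str]: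
--         """Return the keys of `item`, putting `priority_keys` first."""
--         keys = []
--         for key in priority_keys:
--             if key in item:
--                 keys.append(key)
--         for key in item:
--             if key not in priority_keys:
--                 keys.append(key)
--         return keys
--
--     # Strip out common entries first
--     items = without_common_entries(items)
--
--     # Go through and remove more keys
--     new_items: List[Dict[str, Any]] = []
--     for item in items:
--         # For each item, go through the keys in order
--         keys = get_keys(item)
--
--         for i in range(len(keys)):
--             # For each prefix of the keys, keep it if it uniquely identifies
--             # this item.
--             subkeys = keys[: i + 1]
--             subitem = get_subitem(item, subkeys)
--             if sum(1 if get_subitem(item2, subkeys) == subitem else 0 for item2 in items) == 1: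
--                 item = subitem
--                 break
--         new_items.append(item)
--
--     return new_items
-- ===== SOURCE B (Python) =====
-- def unique_simplification(items, priority_keys):
--     """Incremental candidate-set filtering: for each item, walk its ordered keys
--     once, narrowing the set of items that still match the growing key-prefix,
--     instead of re-building and re-comparing every prefix sub-dict against every
--     item for each prefix length."""
--     first = items[0]
--     common = {k for k, v in first.items() if all(item[k] == v for item in items)}
--     stripped = [{k: v for k, v in item.items() if k not in common} for item in items]
--
--     result = []
--     for item in stripped:
--         keys = [k for k in priority_keys if k in item] + [k for k in item if k not in priority_keys]
--         candidates = stripped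
--         prefix = {}
--         chosen = item
--         for k in keys:
--             v = item[k]
--             prefix[k] = v
--             candidates = [c for c in candidates if c.get(k) == v]
--             if len(candidates) == 1:
--                 chosen = dict(prefix)
--                 break
--         result.append(chosen)
--     return result
-- ===== Notes on version B (the rewrite author's own statement) =====
-- stated objective: alternative
-- what changed: Instead of rebuilding every key-prefix sub-dict of every item and comparing it against all items for each prefix length, B walks each item's ordered keys once, incrementally narrowing the set of candidate items that still match the growing prefix, stopping when only the item itself remains.
import Mathlib
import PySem

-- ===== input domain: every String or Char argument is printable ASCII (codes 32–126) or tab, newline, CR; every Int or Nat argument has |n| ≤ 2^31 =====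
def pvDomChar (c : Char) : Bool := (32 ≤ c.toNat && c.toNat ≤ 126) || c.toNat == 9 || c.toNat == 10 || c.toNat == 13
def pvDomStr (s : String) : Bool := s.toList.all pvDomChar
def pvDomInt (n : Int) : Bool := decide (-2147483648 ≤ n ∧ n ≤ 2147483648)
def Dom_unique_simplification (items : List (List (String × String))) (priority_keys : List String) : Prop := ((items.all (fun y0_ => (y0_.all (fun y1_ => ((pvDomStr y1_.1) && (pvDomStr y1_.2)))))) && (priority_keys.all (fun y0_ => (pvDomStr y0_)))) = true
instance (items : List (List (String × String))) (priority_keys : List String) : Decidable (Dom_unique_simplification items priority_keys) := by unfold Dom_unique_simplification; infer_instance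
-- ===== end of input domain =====

-- B replaces A's per-prefix rebuild-and-rescan with incremental candidate-set filtering across the keys (an alternative algorithm of the same measured cost).

-- ===== PORT A =====
-- get_keys: priority keys present in the item first, then the item's own keys not in priority_keys
def pvGetKeysA (priority_keys : List String) (item : List (String × String)) : List String :=
  priority_keys.filter (fun k => (item.lookup k).isSome) ++
    (item.map Prod.fst).filter (fun k => !priority_keys.contains k)

-- get_subitem: {key: item.get(key) for key in subkeys} rendered as the list of (key, Optional value)
-- pairs; comparing two of these with == is exact for the Python dict comparison because both sides
-- carry the same keys in the same order, and a duplicated key always carries the same value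
def pvSubA (item : List (String × String)) (subkeys : List String) : List (String × Option String) :=
  subkeys.map (fun k => (k, item.lookup k))

-- the `for i in range(len(keys))` loop with its break; on break Python materialises the dict
-- {k: item.get(k) for k in subkeys}: one entry per distinct key in first-occurrence order
-- (dict.fromkeys order = PySem.List.dedup), and every such k is a key of `item`, so
-- `(item.lookup k).getD ""` is exactly that present value
def pvTryA (stripped : List (List (String × String))) (item : List (String × String))
    (keys : List String) : List Nat → List (String × String)
  | [] => item
  | i :: rest =>
      let subkeys := keys.take (i + 1)
      let subitem := pvSubA item subkeys
      if stripped.countP (fun it2 => pvSubA it2 subkeys == subitem) == 1 then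
        (PySem.List.dedup subkeys).map (fun k => (k, (item.lookup k).getD ""))
      else pvTryA stripped item keys rest

-- items[0] (the IndexError on [] is outside Pre_)
def pvFirstA (items : List (List (String × String))) : List (String × String) := items.headD []

-- without_common_entries's common_keys: keys of items[0] on which all items agree
-- (`item[key]` KeyError cases are outside Pre_; under Pre_ the Option comparison is exact)
def pvCommonA (items : List (List (String × String))) : List String :=
  ((pvFirstA items).map Prod.fst).filter
    (fun k => items.all (fun it => it.lookup k == (pvFirstA items).lookup k))

def pvStrippedA (items : List (List (String × String))) : List (List (String × String)) :=
  items.map (fun it => it.filter (fun kv => !(pvCommonA items).contains kv.1))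

def unique_simplification (items : List (List (String × String))) (priority_keys : List String) : List (List (String × String)) :=
  (pvStrippedA items).map (fun item =>
    pvTryA (pvStrippedA items) item (pvGetKeysA priority_keys item)
      (List.range (pvGetKeysA priority_keys item).length))

-- ===== PORT B =====
def pvKeysB (priority_keys : List String) (item : List (String × String)) : List String :=
  priority_keys.filter (fun k => (item.lookup k).isSome) ++
    (item.map Prod.fst).filter (fun k => !priority_keys.contains k)

-- B's inner loop: grow the prefix one key at a time, narrowing the candidate list.
-- `v = item[k]` exists for every produced key, so `(item.lookup k).getD ""` is that value;
-- `prefix[k] = v` is a dict write: if k is already a prefix key it keeps its position and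
-- already holds this same value v, otherwise (k, v) is appended — exactly the branch below
def pvLoopB (item : List (String × String)) :
    List (String × String) → List (List (String × String)) → List String → List (String × String)
  | _, _, [] => item
  | pre, cands, k :: rest =>
      let v := (item.lookup k).getD ""
      let pre' := if (pre.lookup k).isSome then pre else pre ++ [(k, v)]
      let cands' := cands.filter (fun c => c.lookup k == some v)
      if cands'.length == 1 then pre' else pvLoopB item pre' cands' rest

-- B's common keys: {k for k, v in first.items() if all(item[k] == v for item in items)} —
-- a dict's keys are distinct, so the set is the list of kept keys; the `item[k]` KeyError
-- cases are outside Pre_, where the Option comparison `== some kv.2` is exact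
def pvCommonB (items : List (List (String × String))) : List String :=
  ((items.headD []).filter
    (fun kv => items.all (fun it => it.lookup kv.1 == some kv.2))).map Prod.fst

def pvStrippedB (items : List (List (String × String))) : List (List (String × String)) :=
  items.map (fun it => it.filter (fun kv => !(pvCommonB items).contains kv.1))

def unique_simplification_alt (items : List (List (String × String))) (priority_keys : List String) : List (List (String × String)) :=
  (pvStrippedB items).map (fun item =>
    pvLoopB item [] (pvStrippedB items) (pvKeysB priority_keys item))

-- ===== PRECONDITION & SPEC =====
-- `all(...)` in without_common_entries short-circuits: A raises KeyError on key k exactly when,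
-- scanning items in order while values still equal items[0][k], some item lacks k
def pvScanRaises (k : String) (v0 : Option String) : List (List (String × String)) → Bool
  | [] => false
  | it :: rest =>
      match it.lookup k with
      | none => true
      | some v => if (some v == v0) then pvScanRaises k v0 rest else false

-- Pre_ excludes: the empty list (IndexError), inputs where a key of the first item is missing in
-- some later item before any value mismatch (KeyError), and — a representation corner — an item
-- whose association list repeats a key, which does not denote distinct entries of a Python dict.
def Pre_unique_simplification (items : List (List (String × String))) (priority_keys : List String) : Prop :=
  items ≠ [] ∧ (∀ it ∈ items, (it.map Prod.fst).Nodup) ∧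
    ∀ k ∈ (items.headD []).map Prod.fst, pvScanRaises k ((items.headD []).lookup k) items = false
instance (items : List (List (String × String))) (priority_keys : List String) : Decidable (Pre_unique_simplification items priority_keys) := by unfold Pre_unique_simplification; infer_instance

def pvWitness_unique_simplification : (List (List (String × String))) × List String :=
  ([[("model", "M1"), ("stop", "#")], [("model", "M2"), ("stop", "#")]], ["model"])

def Spec_unique_simplification (items : List (List (String × String))) (priority_keys : List String) (out : List (List (String × String))) : Prop := out = unique_simplification_alt items priority_keys
instance (items : List (List (String × String))) (priority_keys : List String) (out : List (List (String × String))) : Decidable (Spec_unique_simplification items priority_keys out) := by unfold Spec_unique_simplification; infer_instance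

-- ===== CLAIM (what is proved, stated in full; the proofs are below) =====
def Claim_equal_unique_simplification : Prop := ∀ (items : List (List (String × String))) (priority_keys : List String), Dom_unique_simplification items priority_keys → Pre_unique_simplification items priority_keys → Spec_unique_simplification items priority_keys (unique_simplification items priority_keys)

-- ===== LEMMAS AND PROOFS =====

theorem pv_lookup_isSome_of_mem {l : List (String × String)} {k : String}
    (h : k ∈ l.map Prod.fst) : (l.lookup k).isSome := by
  induction l with
  | nil => simp at h
  | cons p t ih =>
    simp only [List.map_cons, List.mem_cons] at h
    cases hbeq : (k == p.1) with
    | true => simp [List.lookup, hbeq]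
    | false =>
      rw [List.lookup, hbeq]
      rcases h with h | h
      · simp [h] at hbeq
      · exact ih h

theorem pv_keys_isSome (priority_keys : List String) (item : List (String × String)) :
    ∀ k ∈ pvKeysB priority_keys item, (item.lookup k).isSome := by
  intro k hk
  rcases List.mem_append.mp hk with h | h
  · exact (List.mem_filter.mp h).2
  · exact pv_lookup_isSome_of_mem (List.mem_filter.mp h).1

theorem pv_sub_beq_eq_all (it2 item : List (String × String)) (sk : List String) :
    (pvSubA it2 sk == pvSubA item sk) = sk.all (fun k => it2.lookup k == item.lookup k) := by
  induction sk with
  | nil => rfl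
  | cons k rest ih =>
    simp only [pvSubA, List.map_cons, List.all_cons] at *
    rw [List.cons_beq_cons, ih]
    have hpair : ((k, it2.lookup k) == (k, item.lookup k)) = (it2.lookup k == item.lookup k) := by
      show ((k == k) && (it2.lookup k == item.lookup k)) = _
      simp
    rw [hpair]

theorem pv_take_prefix (d : List String) (k : String) (rest : List String) :
    (d ++ k :: rest).take (d.length + 1) = d ++ [k] := by
  rw [List.take_append]; simp

theorem pv_some_getD {o : Option String} (h : o.isSome) : some (o.getD "") = o := by
  cases o <;> simp_all

theorem pv_lookup_map_pair (f : String → String) (k : String) (l : List String) :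
    ((l.map (fun x => (x, f x))).lookup k).isSome = l.contains k := by
  induction l with
  | nil => rfl
  | cons x t ih =>
    cases hb : (k == x) with
    | true =>
      simp only [List.map_cons, List.lookup, hb, List.contains_cons, Bool.true_or,
        Option.isSome_some]
    | false =>
      simp only [List.map_cons, List.lookup, hb, List.contains_cons, Bool.false_or]
      exact ih

theorem pv_set_add_eq (s : List String) (k : String) :
    PySem.Set.add s k = if s.contains k then s else s ++ [k] := by
  unfold PySem.Set.add
  split <;> simp_all

theorem pv_dedup_map_step (f : String → String) (done : List String) (k : String) :
    (PySem.List.dedup (done ++ [k])).map (fun x => (x, f x)) =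
      (if (((PySem.List.dedup done).map (fun x => (x, f x))).lookup k).isSome
        then (PySem.List.dedup done).map (fun x => (x, f x))
        else (PySem.List.dedup done).map (fun x => (x, f x)) ++ [(k, f k)]) := by
  rw [pv_lookup_map_pair]
  simp only [PySem.List.dedup_eq_ofList, PySem.Set.ofList_append_singleton, pv_set_add_eq]
  split
  · rfl
  · simp

theorem pv_loop_eq (stripped : List (List (String × String))) (item : List (String × String))
    (keys : List String) (hkeys : ∀ k ∈ keys, (item.lookup k).isSome) :
    ∀ (ks done : List String), keys = done ++ ks →
      pvTryA stripped item keys (List.range' done.length ks.length) =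
        pvLoopB item ((PySem.List.dedup done).map (fun k => (k, (item.lookup k).getD "")))
          (stripped.filter (fun c => done.all (fun k => c.lookup k == item.lookup k))) ks := by
  intro ks
  induction ks with
  | nil => intro done hd; rfl
  | cons k rest ih =>
    intro done hd
    have hk : (item.lookup k).isSome := hkeys k (by rw [hd]; simp)
    have hsub : keys.take (done.length + 1) = done ++ [k] := by
      rw [hd]; exact pv_take_prefix done k rest
    have hcond :
        stripped.countP (fun it2 => pvSubA it2 (done ++ [k]) == pvSubA item (done ++ [k])) =
          ((stripped.filter (fun c => done.all (fun k' => c.lookup k' == item.lookup k'))).filter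
            (fun c => c.lookup k == some ((item.lookup k).getD ""))).length := by
      rw [List.filter_filter, List.countP_eq_length_filter]
      congr 1
      apply List.filter_congr
      intro c _
      rw [pv_sub_beq_eq_all, pv_some_getD hk]
      simp [List.all_append, Bool.and_comm]
    simp only [List.length_cons]
    rw [List.range'_succ, pvTryA, hsub, pvLoopB]
    simp only [hcond]
    rw [pv_dedup_map_step (fun x => (item.lookup x).getD "") done k]
    split
    · rfl
    · have := ih (done ++ [k]) (by rw [hd]; simp)
      rw [pv_dedup_map_step (fun x => (item.lookup x).getD "") done k] at this
      simpa [List.filter_filter, List.all_append, Bool.and_comm, pv_some_getD hk] using this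

theorem pv_filter_map_fst (l : List (String × String)) (pA : String → Bool)
    (pB : String × String → Bool) (h : ∀ kv ∈ l, pB kv = pA kv.1) :
    (l.filter pB).map Prod.fst = (l.map Prod.fst).filter pA := by
  induction l with
  | nil => rfl
  | cons p t ih =>
    have hp := h p (by simp)
    have ht := ih (fun kv hkv => h kv (by simp [hkv]))
    cases hb : pB p <;> rw [hb] at hp <;>
      simp [hp.symm, hb, ht]

theorem pv_lookup_of_mem_nodup {l : List (String × String)} {k : String} {v : String}
    (h : (l.map Prod.fst).Nodup) (hm : (k, v) ∈ l) : l.lookup k = some v := by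
  induction l with
  | nil => simp at hm
  | cons p t ih =>
    simp only [List.map_cons, List.nodup_cons] at h
    rcases List.mem_cons.mp hm with hm | hm
    · simp [List.lookup, ← hm]
    · cases hb : (k == p.1) with
      | true =>
        exact absurd (by simpa using (List.mem_map_of_mem hm : (k, v).1 ∈ t.map Prod.fst))
          (by simpa [show k = p.1 by simpa using hb] using h.1)
      | false => rw [List.lookup, hb]; exact ih h.2 hm

theorem pv_common_eq (items : List (List (String × String)))
    (hnd : ((items.headD []).map Prod.fst).Nodup) : pvCommonA items = pvCommonB items := by
  unfold pvCommonA pvCommonB pvFirstA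
  refine (pv_filter_map_fst _ _ _ ?_).symm
  intro kv hkv
  apply congrArg
  funext it
  rw [pv_lookup_of_mem_nodup hnd (by simpa using hkv)]

theorem pv_stripped_eq (items : List (List (String × String)))
    (hnd : ((items.headD []).map Prod.fst).Nodup) :
    pvStrippedA items = pvStrippedB items := by
  unfold pvStrippedA pvStrippedB
  rw [pv_common_eq items hnd]

-- ===== VERDICT (by name: the statement is the Claim_ definition above) =====
theorem unique_simplification_spec : Claim_equal_unique_simplification := by
  intro items priority_keys _ hpre
  obtain ⟨hne, hnd, -⟩ := hpre
  have hfirst : items.headD [] ∈ items := by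
    cases items with
    | nil => exact absurd rfl hne
    | cons a t => simp
  unfold Spec_unique_simplification unique_simplification unique_simplification_alt
  rw [← pv_stripped_eq items (hnd _ hfirst)]
  apply List.map_congr_left
  intro item _
  have h := pv_loop_eq (pvStrippedA items) item (pvKeysB priority_keys item)
    (pv_keys_isSome priority_keys item) (pvKeysB priority_keys item) [] rfl
  simpa [pvGetKeysA, pvKeysB, List.range_eq_range'] using h
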